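-- pv_equiv track=rewrite | github.com/darsrc/aider-aid | src/aider_aid/services.py | _collect_model_overrides
-- ===== SOURCE A (Python) =====
-- MODEL_OVERRIDE_FLAGS = ("--model", "--weak-model", "--editor-model")
--
-- def _collect_model_overrides(extra_args: list[str]) -> list[tuple[str, str]]:
--     overrides: list[tuple[str, str]] = []
--     idx = 0
--     while idx < len(extra_args):
--         arg = extra_args[idx].strip()
--         if "=" in arg:
--             flag, value = arg.split("=", 1)
--             value = value.strip()
--             if flag in MODEL_OVERRIDE_FLAGS and value:
--                 overrides.append((flag, value))
--         elif arg in MODEL_OVERRIDE_FLAGS and idx + 1 < len(extra_args):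
--             value = extra_args[idx + 1].strip()
--             if value:
--                 overrides.append((arg, value))
--             idx += 1
--         idx += 1
--     return overrides
-- ===== SOURCE B (Python) =====
-- MODEL_OVERRIDE_FLAGS = ("--model", "--weak-model", "--editor-model")
--
--
-- def _collect_model_overrides(extra_args: list[str]) -> list[tuple[str, str]]:
--     # One-state finite-state machine folded over the tokens: `pending` holds a
--     # flag awaiting its value.  Each token is processed exactly once; a token
--     # that follows a bare flag is routed to the "pending" branch instead of
--     # being re-inspected, which reproduces the flag/value pairing without any
--     # lookahead or index arithmetic.
--     overrides: list[tuple[str, str]] = []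
--     pending: str | None = None
--     for raw in extra_args:
--         arg = raw.strip()
--         if pending is not None:
--             if arg:
--                 overrides.append((pending, arg))
--             pending = None
--         elif "=" in arg:
--             flag, value = arg.split("=", 1)
--             value = value.strip()
--             if flag in MODEL_OVERRIDE_FLAGS and value:
--                 overrides.append((flag, value))
--         elif arg in MODEL_OVERRIDE_FLAGS:
--             pending = arg
--     return overrides
-- ===== Notes on version B (the rewrite author's own statement) =====
-- stated objective: alternative
-- what changed: Replaces A's integer-index while loop with manual +2 advance and lookahead extra_args[idx+1] by a finite-state-machine fold: each token is processed exactly once and a 'pending' state variable carries a bare flag to the next iteration, so there is no lookahead or index arithmetic at all.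
import Mathlib
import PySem

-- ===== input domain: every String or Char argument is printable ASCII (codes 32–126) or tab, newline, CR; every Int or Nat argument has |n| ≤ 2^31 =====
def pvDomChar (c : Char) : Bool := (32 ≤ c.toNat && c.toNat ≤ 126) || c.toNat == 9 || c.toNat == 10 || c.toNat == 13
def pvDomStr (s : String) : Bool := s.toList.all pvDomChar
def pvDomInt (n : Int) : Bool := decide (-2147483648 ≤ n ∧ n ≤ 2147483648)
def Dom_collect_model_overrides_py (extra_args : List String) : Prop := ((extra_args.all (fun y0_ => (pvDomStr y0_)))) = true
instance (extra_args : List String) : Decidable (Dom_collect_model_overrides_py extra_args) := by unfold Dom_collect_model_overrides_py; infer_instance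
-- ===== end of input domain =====

-- B replaces A's index loop (manual +2 advance with lookahead) by a finite-state-machine
-- fold: a 'pending' flag state carries a bare flag to the next token, each token handled once.

-- ===== PORT A =====
-- MODEL_OVERRIDE_FLAGS = ("--model", "--weak-model", "--editor-model")
def pvFlags : List String := ["--model", "--weak-model", "--editor-model"]

-- A's while loop: state is (idx, overrides); recursion on xs.length - idx
def collectA (xs : List String) (idx : Nat) (overrides : List (String × String)) :
    List (String × String) :=
  if h : idx < xs.length then
    let arg := PySem.Str.strip (xs.getD idx "")
    if PySem.Str.isIn "=" arg then
      let parts := (PySem.Str.splitMax? arg "=" 1).getD []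
      let flag := parts.getD 0 ""
      let value := PySem.Str.strip (parts.getD 1 "")
      if flag ∈ pvFlags ∧ value ≠ "" then
        collectA xs (idx + 1) (overrides ++ [(flag, value)])
      else
        collectA xs (idx + 1) overrides
    else if arg ∈ pvFlags ∧ idx + 1 < xs.length then
      let value := PySem.Str.strip (xs.getD (idx + 1) "")
      if value ≠ "" then
        collectA xs (idx + 2) (overrides ++ [(arg, value)])
      else
        collectA xs (idx + 2) overrides
    else
      collectA xs (idx + 1) overrides
  else
    overrides
termination_by xs.length - idx

def collect_model_overrides_py (extra_args : List String) : List (String × String) :=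
  collectA extra_args 0 []

-- ===== PORT B =====
-- B's loop body, one token at a time; the state is (pending flag, overrides so far)
def stepB (st : Option String × List (String × String)) (raw : String) :
    Option String × List (String × String) :=
  let arg := PySem.Str.strip raw
  match st.1 with
  | some pending =>
    (none, if arg ≠ "" then st.2 ++ [(pending, arg)] else st.2)
  | none =>
    if PySem.Str.isIn "=" arg then
      let parts := (PySem.Str.splitMax? arg "=" 1).getD []
      let flag := parts.getD 0 ""
      let value := PySem.Str.strip (parts.getD 1 "")
      (none, if flag ∈ pvFlags ∧ value ≠ "" then st.2 ++ [(flag, value)] else st.2)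
    else if arg ∈ pvFlags then
      (some arg, st.2)
    else
      (none, st.2)

def collect_model_overrides_py_alt (extra_args : List String) : List (String × String) :=
  (extra_args.foldl stepB (none, [])).2

-- ===== PRECONDITION & SPEC =====
def Spec_collect_model_overrides_py (extra_args : List String) (out : List (String × String)) : Prop := out = collect_model_overrides_py_alt extra_args
instance (extra_args : List String) (out : List (String × String)) : Decidable (Spec_collect_model_overrides_py extra_args out) := by unfold Spec_collect_model_overrides_py; infer_instance

-- ===== CLAIM =====
def Claim_equal_collect_model_overrides_py : Prop := ∀ (extra_args : List String), Dom_collect_model_overrides_py extra_args → Spec_collect_model_overrides_py extra_args (collect_model_overrides_py extra_args)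

-- ===== LEMMAS AND PROOFS =====

-- A's loop from position idx, with accumulator acc, equals the FSM fold over the
-- remaining suffix started in the idle state with the same accumulator.
theorem collectA_eq_fold (xs : List String) :
    ∀ n idx acc, xs.length - idx = n →
      collectA xs idx acc = (List.foldl stepB (none, acc) (xs.drop idx)).2 := by
  intro n
  induction n using Nat.strong_induction_on with
  | _ n ih =>
    intro idx acc hn
    by_cases h : idx < xs.length
    · obtain ⟨a, rest, hdrop⟩ : ∃ a rest, xs.drop idx = a :: rest := by
        cases hd : xs.drop idx with
        | nil => exact absurd (List.drop_eq_nil_iff.mp hd) (by omega)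
        | cons a rest => exact ⟨a, rest, rfl⟩
      have hga : xs.getD idx "" = a := by
        have h0 := congrArg (·[0]?) hdrop
        simp at h0
        simp [List.getD, h0]
      have hdrop1 : xs.drop (idx + 1) = rest := by
        rw [← List.tail_drop, hdrop]; rfl
      rw [hdrop, collectA.eq_def, dif_pos h, hga]
      by_cases h1 : PySem.Str.isIn "=" (PySem.Str.strip a) = true
      · -- key=value token: FSM stays idle after one step
        rw [if_pos h1, List.foldl_cons,
          show stepB (none, acc) a =
            (none,
             if ((PySem.Str.splitMax? (PySem.Str.strip a) "=" 1).getD []).getD 0 "" ∈ pvFlags ∧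
                PySem.Str.strip (((PySem.Str.splitMax? (PySem.Str.strip a) "=" 1).getD []).getD 1 "") ≠ ""
             then acc ++ [(((PySem.Str.splitMax? (PySem.Str.strip a) "=" 1).getD []).getD 0 "",
                           PySem.Str.strip (((PySem.Str.splitMax? (PySem.Str.strip a) "=" 1).getD []).getD 1 ""))]
             else acc)
          from by simp only [stepB]; rw [if_pos h1]]
        by_cases hc : (((PySem.Str.splitMax? (PySem.Str.strip a) "=" 1).getD []).getD 0 "" ∈ pvFlags ∧
            PySem.Str.strip (((PySem.Str.splitMax? (PySem.Str.strip a) "=" 1).getD []).getD 1 "") ≠ "")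
        · rw [if_pos hc, if_pos hc,
            ih (xs.length - (idx + 1)) (by omega) (idx + 1) _ rfl, hdrop1]
        · rw [if_neg hc, if_neg hc,
            ih (xs.length - (idx + 1)) (by omega) (idx + 1) _ rfl, hdrop1]
      · rw [if_neg h1]
        by_cases hf : PySem.Str.strip a ∈ pvFlags
        · -- bare flag: FSM moves to the pending state
          have hstep : stepB (none, acc) a = (some (PySem.Str.strip a), acc) := by
            simp only [stepB]; rw [if_neg h1, if_pos hf]
          cases rest with
          | nil =>
            -- flag is the last token: A's idx+1<len test fails; the pending state dies
            have hlen1 : xs.length = idx + 1 := by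
              have := congrArg List.length hdrop1; simp at this; omega
            rw [if_neg (show ¬(PySem.Str.strip a ∈ pvFlags ∧ idx + 1 < xs.length) from
                fun hx => by omega),
              ih (xs.length - (idx + 1)) (by omega) (idx + 1) _ rfl, hdrop1,
              List.foldl_cons, hstep]
            simp
          | cons b rest' =>
            have h2 : idx + 1 < xs.length := by
              have := congrArg List.length hdrop1; simp at this; omega
            have hgb : xs.getD (idx + 1) "" = b := by
              have h0 := congrArg (·[0]?) hdrop1
              simp at h0
              simp [List.getD, h0]
            have hdrop2 : xs.drop (idx + 2) = rest' := by
              rw [show idx + 2 = (idx + 1) + 1 from rfl, ← List.tail_drop, hdrop1]; rfl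
            have hstep2 : stepB (some (PySem.Str.strip a), acc) b =
                (none, if PySem.Str.strip b ≠ "" then acc ++ [(PySem.Str.strip a, PySem.Str.strip b)] else acc) := by
              simp [stepB]
            rw [if_pos ⟨hf, h2⟩, hgb, List.foldl_cons, hstep, List.foldl_cons, hstep2]
            by_cases hv : PySem.Str.strip b ≠ ""
            · rw [if_pos hv, if_pos hv,
                ih (xs.length - (idx + 2)) (by omega) (idx + 2) _ rfl, hdrop2]
            · rw [if_neg hv, if_neg hv,
                ih (xs.length - (idx + 2)) (by omega) (idx + 2) _ rfl, hdrop2]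
        · -- irrelevant token: FSM stays idle
          rw [if_neg (show ¬(PySem.Str.strip a ∈ pvFlags ∧ idx + 1 < xs.length) from
              fun hx => hf hx.1),
            ih (xs.length - (idx + 1)) (by omega) (idx + 1) _ rfl, hdrop1,
            List.foldl_cons, show stepB (none, acc) a = (none, acc) from by simp only [stepB]; rw [if_neg h1, if_neg hf]]
    · rw [collectA.eq_def, dif_neg h, List.drop_eq_nil_iff.mpr (by omega)]
      simp

-- ===== VERDICT =====
theorem collect_model_overrides_py_spec : Claim_equal_collect_model_overrides_py := by
  intro xs _
  unfold Spec_collect_model_overrides_py collect_model_overrides_py collect_model_overrides_py_alt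
  simpa using collectA_eq_fold xs (xs.length - 0) 0 [] rfl
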